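-- pv_equiv track=rewrite | github.com/charleslwang/Discrete-Math-Projects | Coding-3/coding3.py | is_one_to_one
-- ===== SOURCE A (Python) =====
-- def is_one_to_one(domain, co_domain, mapping):
--     """Determines if the function is one-to-one.
--
--     Args:
--         domain [list[int]]: a list of values in the domain
--         co_domain [list[int]]: a list of values in teh co-domain
--         mapping [dict[int,int]]: a dictionary of the function mapping between the domain and co-domain
--
--     Returns:
--         meets_definition [bool]: 0 for False, 1 for True
--
--     """
--
--     count = {}
--     for i in mapping.values():
--         if i in count:
--             count[i] += 1
--         else:
--             count[i] = 1
--
--     meets_definition = all(count[x] == 1 for x in count)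
--     return meets_definition
-- ===== SOURCE B (Python) =====
-- def is_one_to_one(domain, co_domain, mapping):
--     """Sort the mapped values; the mapping is injective iff no two equal
--     values are adjacent in the sorted order."""
--     vals = sorted(mapping.values())
--     return all(a != b for a, b in zip(vals, vals[1:]))
-- ===== Notes on version B (the rewrite author's own statement) =====
-- stated objective: alternative
-- what changed: Replaces A's count-dict build plus all()-scan with a comparison-based sort of mapping.values() followed by an adjacent-pair scan: a duplicate value exists iff two equal values are adjacent after sorting.
import Mathlib
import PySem

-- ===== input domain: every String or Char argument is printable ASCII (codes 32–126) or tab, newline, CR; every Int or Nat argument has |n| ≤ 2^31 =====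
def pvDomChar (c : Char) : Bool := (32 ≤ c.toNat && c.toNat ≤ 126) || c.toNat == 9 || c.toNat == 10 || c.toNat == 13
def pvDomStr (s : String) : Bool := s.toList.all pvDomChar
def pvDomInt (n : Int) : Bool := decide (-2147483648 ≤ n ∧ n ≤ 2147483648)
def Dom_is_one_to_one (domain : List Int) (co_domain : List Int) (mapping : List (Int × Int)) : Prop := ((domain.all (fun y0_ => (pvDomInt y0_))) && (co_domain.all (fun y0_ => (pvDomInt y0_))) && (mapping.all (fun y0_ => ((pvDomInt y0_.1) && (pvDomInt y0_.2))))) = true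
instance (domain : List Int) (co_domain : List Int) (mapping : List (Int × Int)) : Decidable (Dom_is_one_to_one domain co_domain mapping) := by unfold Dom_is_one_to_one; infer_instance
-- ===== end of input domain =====

-- B replaces A's count-dict build plus all()-scan by sorting the values and scanning adjacent pairs (objective: alternative).

-- ===== PORT A =====
def is_one_to_one (domain : List Int) (co_domain : List Int) (mapping : List (Int × Int)) : Bool :=
  -- count = {}; for i in mapping.values(): if i in count: count[i] += 1 else: count[i] = 1
  let count : PySem.Dict Int Int :=
    (mapping.map Prod.snd).foldl
      (fun d i => if d.contains i then d.modify i 0 (· + 1) else d.insert i 1)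
      PySem.Dict.empty
  -- meets_definition = all(count[x] == 1 for x in count)
  count.keys.all (fun x => count.getD x 0 == 1)

-- ===== PORT B =====
-- vals = sorted(mapping.values()); return all(a != b for a, b in zip(vals, vals[1:]))
def is_one_to_one_alt (domain : List Int) (co_domain : List Int) (mapping : List (Int × Int)) : Bool :=
  let vals := PySem.List.sorted (mapping.map Prod.snd) (fun x => x) false
  (vals.zip vals.tail).all (fun p => p.1 != p.2)

-- ===== PRECONDITION & SPEC =====
def Spec_is_one_to_one (domain : List Int) (co_domain : List Int) (mapping : List (Int × Int)) (out : Bool) : Prop := out = is_one_to_one_alt domain co_domain mapping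
instance (domain : List Int) (co_domain : List Int) (mapping : List (Int × Int)) (out : Bool) : Decidable (Spec_is_one_to_one domain co_domain mapping out) := by unfold Spec_is_one_to_one; infer_instance

-- ===== CLAIM =====
def Claim_equal_is_one_to_one : Prop := ∀ (domain : List Int) (co_domain : List Int) (mapping : List (Int × Int)), Dom_is_one_to_one domain co_domain mapping → Spec_is_one_to_one domain co_domain mapping (is_one_to_one domain co_domain mapping)

-- ===== LEMMAS AND PROOFS =====

-- A's loop body is exactly the Counter step (insert of 1 on a fresh key IS modify with default 0).
theorem count_step_eq (d : PySem.Dict Int Int) (i : Int) :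
    (if d.contains i then d.modify i 0 (· + 1) else d.insert i 1) = d.modify i 0 (· + 1) := by
  by_cases h : d.contains i = true
  · simp [h]
  · simp only [Bool.not_eq_true] at h
    simp [h, PySem.Dict.modify, PySem.Dict.getD_of_not_contains d 0 h]

-- A's result is "the values list has no duplicate".
theorem is_one_to_one_eq_nodup (vals : List Int) :
    (let count : PySem.Dict Int Int :=
        vals.foldl (fun d i => if d.contains i then d.modify i 0 (· + 1) else d.insert i 1) PySem.Dict.empty
     count.keys.all (fun x => count.getD x 0 == 1)) = decide vals.Nodup := by
  have hfold : vals.foldl (fun d i => if d.contains i then d.modify i 0 (· + 1) else d.insert i 1) PySem.Dict.empty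
      = PySem.Dict.counter vals := by
    rw [PySem.Dict.counter_eq_foldl]
    apply PySem.List.foldl_congr_mem
    intro acc x _
    exact count_step_eq acc x
  simp only [hfold, PySem.Dict.keys_counter, PySem.Dict.getD_counter]
  by_cases hN : vals.Nodup
  · rw [decide_eq_true hN]
    rw [List.nodup_iff_count_eq_one] at hN
    simp only [List.all_eq_true]
    intro x hx
    rw [PySem.Set.mem_ofList] at hx
    simp [hN x hx]
  · rw [decide_eq_false hN]
    rw [List.nodup_iff_count_eq_one] at hN
    push Not at hN
    obtain ⟨a, ha, hc⟩ := hN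
    simp only [List.all_eq_true, Bool.eq_false_iff, ne_eq]
    intro hall
    have := hall a (by rw [PySem.Set.mem_ofList]; exact ha)
    simp only [beq_iff_eq] at this
    omega

-- On a non-decreasing list, the adjacent-pair scan decides Nodup.
theorem adj_scan_eq_nodup : ∀ (l : List Int), l.Pairwise (· ≤ ·) →
    ((l.zip l.tail).all (fun p => p.1 != p.2)) = decide l.Nodup := by
  intro l
  induction l with
  | nil => intro _; simp
  | cons a l ih =>
    intro h
    cases l with
    | nil => simp
    | cons b t =>
      have hab : a ≤ b := (List.pairwise_cons.mp h).1 b (by simp)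
      have hat : ∀ x ∈ t, a ≤ x := fun x hx => (List.pairwise_cons.mp h).1 x (by simp [hx])
      have hbt : ∀ x ∈ t, b ≤ x := fun x hx => (List.pairwise_cons.mp (List.pairwise_cons.mp h).2).1 x hx
      have hrec := ih (List.pairwise_cons.mp h).2
      simp only [List.tail_cons, List.zip_cons_cons, List.all_cons] at hrec ⊢
      rw [hrec]
      by_cases hEq : a = b
      · subst hEq
        simp [List.nodup_cons]
      · have hmem : a ∉ b :: t := by
          intro hm
          rcases List.mem_cons.mp hm with rfl | hmt
          · exact hEq rfl
          · exact hEq (le_antisymm hab (hbt a hmt))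
        have : (a != b) = true := by simp [hEq]
        rw [this, Bool.true_and]
        by_cases hN : (b :: t).Nodup
        · rw [decide_eq_true hN, decide_eq_true (List.nodup_cons.mpr ⟨hmem, hN⟩)]
        · rw [decide_eq_false hN, decide_eq_false (by simp [List.nodup_cons, hN])]

-- ===== VERDICT =====
theorem is_one_to_one_spec : Claim_equal_is_one_to_one := by
  intro domain co_domain mapping _
  unfold Spec_is_one_to_one is_one_to_one is_one_to_one_alt
  rw [is_one_to_one_eq_nodup (mapping.map Prod.snd)]
  have hp := PySem.List.sorted_pairwise (mapping.map Prod.snd) (fun x => x)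
  rw [adj_scan_eq_nodup _ hp, decide_eq_decide]
  exact (PySem.List.sorted_perm (mapping.map Prod.snd) (fun x => x) false).nodup_iff.symm
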